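-- pv_equiv track=rewrite | github.com/Francis-Tao-jinjin/Grokking-Data-Structures-Algorithms-python | Queue/Generate Binary Numbers from 1 to N/solution.py | generateBinaryNumbers
-- ===== SOURCE A (Python) =====
-- from queue import Queue
--
-- def generateBinaryNumbers(n):
--     q = Queue()
--     q.put("1")
--     res = []
--     while n > 0:
--         current = q.get()
--         res.append(current)
--         q.put(current + "0")
--         q.put(current + "1")
--         n -= 1
--
--     return res
-- ===== SOURCE B (Python) =====
-- def generateBinaryNumbers(n):
--     res = []
--     count = n
--     i = 1
--     while count > 0:
--         bits = []
--         x = i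
--         while x > 0:
--             bits.append('1' if x % 2 == 1 else '0')
--             x //= 2
--         res.append(''.join(reversed(bits)))
--         i += 1
--         count -= 1
--     return res
-- ===== Notes on version B (the rewrite author's own statement) =====
-- stated objective: alternative
-- what changed: Replaces the BFS queue of growing string concatenations with a counter loop that derives each number's binary string directly by repeated halving (bit extraction), keeping no queue state.
import Mathlib
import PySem

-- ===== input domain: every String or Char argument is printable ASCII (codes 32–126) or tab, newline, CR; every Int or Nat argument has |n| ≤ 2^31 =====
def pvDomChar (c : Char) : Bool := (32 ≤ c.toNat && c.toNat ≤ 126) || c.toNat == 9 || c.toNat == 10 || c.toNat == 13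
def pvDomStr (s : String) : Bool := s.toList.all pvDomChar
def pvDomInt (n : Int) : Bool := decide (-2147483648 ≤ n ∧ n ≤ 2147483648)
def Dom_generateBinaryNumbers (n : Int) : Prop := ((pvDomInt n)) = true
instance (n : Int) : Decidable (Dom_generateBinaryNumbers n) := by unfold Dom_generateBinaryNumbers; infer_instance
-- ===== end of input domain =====

-- B replaces A's BFS queue of string concatenations by per-number bit extraction (alternative algorithm).

-- ===== PORT A =====
-- A's while loop: fuel = number of remaining iterations (n decremented to 0), queue as a list (FIFO).
def pvALoop : Nat → List String → List String → List String
  | 0, _, res => res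
  | _ + 1, [], res => res   -- unreachable: the queue is never empty
  | fuel + 1, current :: q, res =>
      pvALoop fuel (q ++ [current ++ "0", current ++ "1"]) (res ++ [current])

def generateBinaryNumbers (n : Int) : List String := pvALoop n.toNat ["1"] []

-- ===== PORT B =====
-- inner 'while x > 0' loop: collect bits least-significant first
def pvBits (x : Nat) : List Char :=
  if _ : x = 0 then []
  else (if x % 2 = 1 then '1' else '0') :: pvBits (x / 2)
decreasing_by exact Nat.div_lt_self (Nat.pos_of_ne_zero ‹x ≠ 0›) (by omega)

def pvBLoop : Nat → Nat → List String → List String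
  | 0, _, res => res
  | count + 1, i, res => pvBLoop count (i + 1) (res ++ [String.ofList (pvBits i).reverse])

def generateBinaryNumbers_alt (n : Int) : List String := pvBLoop n.toNat 1 []

-- ===== PRECONDITION & SPEC =====
def Spec_generateBinaryNumbers (n : Int) (out : List String) : Prop := out = generateBinaryNumbers_alt n
instance (n : Int) (out : List String) : Decidable (Spec_generateBinaryNumbers n out) := by unfold Spec_generateBinaryNumbers; infer_instance

-- ===== CLAIM (what is proved, stated in full; the proofs are below) =====
def Claim_equal_generateBinaryNumbers : Prop := ∀ (n : Int), Dom_generateBinaryNumbers n → Spec_generateBinaryNumbers n (generateBinaryNumbers n)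

-- ===== LEMMAS AND PROOFS =====

def pvBin (i : Nat) : String := String.ofList (pvBits i).reverse

theorem pvBits_double (i : Nat) (hi : 0 < i) : pvBits (2 * i) = '0' :: pvBits i := by
  rw [pvBits, dif_neg (by omega : ¬ 2 * i = 0)]
  simp [Nat.mul_mod_right, Nat.mul_div_cancel_left i (by omega : 0 < 2)]

theorem pvBits_double_succ (i : Nat) : pvBits (2 * i + 1) = '1' :: pvBits i := by
  rw [pvBits, dif_neg (by omega : ¬ 2 * i + 1 = 0)]
  simp [Nat.mul_add_div (by omega : 0 < 2)]

theorem pvBin_double (i : Nat) (hi : 0 < i) : pvBin (2 * i) = pvBin i ++ "0" := by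
  simp [pvBin, pvBits_double i hi]

theorem pvBin_double_succ (i : Nat) : pvBin (2 * i + 1) = pvBin i ++ "1" := by
  simp [pvBin, pvBits_double_succ i]

-- queue invariant: after processing numbers < i, the queue holds pvBin of i, i+1, …, 2i-1
theorem pvLoop_eq (fuel : Nat) : ∀ (i : Nat) (res : List String), 0 < i →
    pvALoop fuel ((List.range' i i).map pvBin) res = pvBLoop fuel i res := by
  induction fuel with
  | zero => intro i res _; rfl
  | succ f ih =>
    intro i res hi
    have hq : List.range' i i = i :: List.range' (i + 1) (i - 1) := by
      obtain ⟨j, rfl⟩ := Nat.exists_eq_add_of_lt hi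
      simp [List.range'_succ]
    have hq2 : List.range' (i + 1) (i - 1) ++ [2 * i, 2 * i + 1] = List.range' (i + 1) (i + 1) := by
      have h1 : List.range' (i + 1) (i - 1 + 1) = List.range' (i + 1) (i - 1) ++ [i + 1 + 1 * (i - 1)] :=
        List.range'_concat
      have h2 : List.range' (i + 1) (i + 1) = List.range' (i + 1) i ++ [i + 1 + 1 * i] :=
        List.range'_concat
      have e1 : i + 1 + 1 * (i - 1) = 2 * i := by omega
      have e2 : i - 1 + 1 = i := by omega
      have e3 : i + 1 + 1 * i = 2 * i + 1 := by omega
      rw [e2, e1] at h1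
      rw [e3] at h2
      rw [h2, h1]
      simp
    rw [hq]
    show pvALoop (f + 1) (pvBin i :: (List.range' (i + 1) (i - 1)).map pvBin) res = _
    rw [pvALoop, pvBLoop]
    have : (List.range' (i + 1) (i - 1)).map pvBin ++ [pvBin i ++ "0", pvBin i ++ "1"]
        = (List.range' (i + 1) (i + 1)).map pvBin := by
      rw [← hq2]
      simp [pvBin_double i hi, pvBin_double_succ i]
    rw [this, ih (i + 1) (res ++ [pvBin i]) (by omega)]
    rfl

-- ===== VERDICT (by name: the statement is the Claim_ definition above) =====
theorem generateBinaryNumbers_spec : Claim_equal_generateBinaryNumbers := by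
  intro n _
  unfold Spec_generateBinaryNumbers generateBinaryNumbers generateBinaryNumbers_alt
  have h := pvLoop_eq n.toNat 1 [] (by omega)
  have hq : (List.range' 1 1).map pvBin = ["1"] := by
    simp [List.range', pvBin, pvBits]
  rw [hq] at h
  exact h
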